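-- pv_equiv track=rewrite | github.com/DancingOnAir/LeetcodePythonSolution | array/2588_count_the_number_of_beautiful_subarrays.py | beautifulSubarrays
-- ===== SOURCE A (Python) =====
-- from typing import List
-- from collections import Counter
--
-- def beautifulSubarrays(nums: List[int]) -> int:
--     dp = Counter({0: 1})
--     res = pre = 0
--     for x in nums:
--         pre ^= x
--         res += dp[pre]
--         dp[pre] += 1
--     return res
-- ===== SOURCE B (Python) =====
-- from typing import List
-- from collections import Counter
--
-- def beautifulSubarrays(nums: List[int]) -> int:
--     # Build the full prefix-XOR table first, then count pairs per group.
--     prefixes = [0]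
--     pre = 0
--     for x in nums:
--         pre ^= x
--         prefixes.append(pre)
--     cnt = Counter(prefixes)
--     return sum(c * (c - 1) // 2 for c in cnt.values())
-- ===== Notes on version B (the rewrite author's own statement) =====
-- stated objective: alternative
-- what changed: B first materialises the whole prefix-XOR table ([0, p1, ..., pn]) in one pass, builds its frequency Counter in bulk, and in a separate group pass returns sum(c*(c-1)//2) over the counts, instead of A's interleaved scan that looks up and increments the counter while accumulating pairs on the fly.
import Mathlib
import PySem

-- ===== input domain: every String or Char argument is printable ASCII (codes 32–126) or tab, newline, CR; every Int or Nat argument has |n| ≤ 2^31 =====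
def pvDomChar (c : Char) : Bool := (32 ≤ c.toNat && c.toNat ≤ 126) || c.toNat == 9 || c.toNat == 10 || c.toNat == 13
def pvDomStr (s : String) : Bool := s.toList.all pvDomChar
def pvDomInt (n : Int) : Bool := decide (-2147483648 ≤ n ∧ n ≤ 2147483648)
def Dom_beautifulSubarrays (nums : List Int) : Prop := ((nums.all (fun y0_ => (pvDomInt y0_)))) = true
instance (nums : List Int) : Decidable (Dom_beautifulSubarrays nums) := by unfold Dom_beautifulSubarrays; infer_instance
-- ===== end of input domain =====

-- B builds the full prefix-XOR table first, then tallies it and sums c*(c-1)//2 per group,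
-- instead of A's interleaved lookup-then-increment scan; same O(n) cost (objective: alternative).

-- ===== PORT A =====
def beautifulSubarrays (nums : List Int) : Int :=
  let dp : PySem.Dict Int Int := PySem.Dict.ofList [(0, 1)]
  let st := nums.foldl (fun (st : PySem.Dict Int Int × Int × Int) x =>
      let pre := PySem.Int.bxor st.2.2 x
      let res := st.2.1 + st.1.getD pre 0
      let dp := st.1.modify pre 0 (· + 1)
      (dp, res, pre)) (dp, 0, 0)
  st.2.1

-- ===== PORT B =====
def beautifulSubarrays_alt (nums : List Int) : Int :=
  let st := nums.foldl (fun (st : List Int × Int) x =>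
      let pre := PySem.Int.bxor st.2 x
      (st.1 ++ [pre], pre)) ([0], 0)
  ((PySem.Dict.counter st.1).values.map (fun c => PySem.Int.floordiv (c * (c - 1)) 2)).sum

-- ===== PRECONDITION & SPEC =====
def Spec_beautifulSubarrays (nums : List Int) (out : Int) : Prop := out = beautifulSubarrays_alt nums
instance (nums : List Int) (out : Int) : Decidable (Spec_beautifulSubarrays nums out) := by unfold Spec_beautifulSubarrays; infer_instance

-- ===== CLAIM (what is proved, stated in full; the proofs are below) =====
def Claim_equal_beautifulSubarrays : Prop := ∀ (nums : List Int), Dom_beautifulSubarrays nums → Spec_beautifulSubarrays nums (beautifulSubarrays nums)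

-- ===== LEMMAS AND PROOFS =====

-- pair count of one group, c*(c-1)//2
def pvF (c : Int) : Int := PySem.Int.floordiv (c * (c - 1)) 2

-- sum of pair counts over a counter's values
def pvPsum (d : PySem.Dict Int Int) : Int := (d.values.map pvF).sum

-- the sequence of prefix-XOR values the loop produces from accumulator pre
def pvPrefs (pre : Int) : List Int → List Int
  | [] => []
  | x :: t =>
      let p := PySem.Int.bxor pre x
      p :: pvPrefs p t

theorem pvF_succ (c : Int) : pvF (c + 1) = pvF c + c := by
  obtain ⟨k, hk⟩ := Int.even_mul_succ_self (c - 1)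
  have h1 : c * (c - 1) = 2 * k := by linear_combination hk
  have h2 : (c + 1) * (c + 1 - 1) = 2 * (k + c) := by linear_combination hk
  unfold pvF
  rw [PySem.Int.floordiv_eq_ediv_of_pos (by norm_num),
      PySem.Int.floordiv_eq_ediv_of_pos (by norm_num), h1, h2,
      Int.mul_ediv_cancel_left _ (by norm_num), Int.mul_ediv_cancel_left _ (by norm_num)]

theorem pvSum_update (v : Int) (g : Int → Int) (l : List Int) (hl : l.Nodup) (hv : v ∈ l) :
    (l.map (fun k => pvF (if k = v then g v + 1 else g k))).sum
      = (l.map (fun k => pvF (g k))).sum + g v := by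
  induction l with
  | nil => cases hv
  | cons a t ih =>
    rcases List.nodup_cons.mp hl with ⟨hat, hnt⟩
    rcases List.mem_cons.mp hv with h | hmem
    · subst h
      simp only [List.map_cons, List.sum_cons]
      have : (t.map (fun k => pvF (if k = v then g v + 1 else g k))).sum
           = (t.map (fun k => pvF (g k))).sum := by
        congr 1
        apply List.map_congr_left
        intro k hk
        rw [if_neg (by rintro rfl; exact hat hk)]
      rw [this]
      simp only [if_pos]
      rw [pvF_succ]; ring
    · have hav : a ≠ v := by rintro rfl; exact hat hmem
      simp only [List.map_cons, List.sum_cons, if_neg hav]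
      rw [ih hnt hmem]; ring

theorem psum_modify (d : PySem.Dict Int Int) (v : Int) (hnd : d.keys.Nodup) :
    pvPsum (d.modify v 0 (· + 1)) = pvPsum d + d.getD v 0 := by
  have hnd' : (d.modify v 0 (· + 1)).keys.Nodup := by
    rw [PySem.Dict.keys_modify]
    exact PySem.Dict.nodup_keys_insert _ _ _ hnd
  unfold pvPsum
  rw [PySem.Dict.values_eq_map_keys _ hnd' 0, PySem.Dict.values_eq_map_keys d hnd 0,
      List.map_map, List.map_map]
  simp only [Function.comp_def]
  by_cases hc : d.contains v = true
  · have hkeys : (d.modify v 0 (· + 1)).keys = d.keys := by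
      rw [PySem.Dict.keys_modify, PySem.Dict.keys_insert_of_contains d _ hc]
    rw [hkeys, ← pvSum_update v (fun k => d.getD k 0) d.keys hnd
          ((PySem.Dict.contains_iff_mem_keys d v).mp hc)]
    congr 1
    apply List.map_congr_left
    intro k hk
    simp [PySem.Dict.getD_modify]
  · have hc' : d.contains v = false := by simpa using hc
    have hkeys : (d.modify v 0 (· + 1)).keys = d.keys ++ [v] := by
      rw [PySem.Dict.keys_modify, PySem.Dict.keys_insert_of_not_contains d _ hc']
    rw [hkeys, List.map_append, List.sum_append]
    have hv0 : d.getD v 0 = 0 := PySem.Dict.getD_of_not_contains d 0 hc'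
    have hvk : v ∉ d.keys := fun h => by
      rw [(PySem.Dict.contains_iff_mem_keys d v).mpr h] at hc'; cases hc'
    have htail : List.map (fun k => pvF ((d.modify v 0 (· + 1)).getD k 0)) d.keys
        = List.map (fun k => pvF (d.getD k 0)) d.keys := by
      apply List.map_congr_left
      intro k hk
      have hkv : k ≠ v := by rintro rfl; exact hvk hk
      simp [PySem.Dict.getD_modify, hkv]
    rw [htail]
    simp [PySem.Dict.getD_modify, hv0]
    decide

-- A's loop: the running res equals the pair-sum of the counter extended by the produced prefixes
theorem pvLoopA (l : List Int) : ∀ (d : PySem.Dict Int Int) (res pre : Int),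
    d.keys.Nodup → res = pvPsum d →
    (l.foldl (fun (st : PySem.Dict Int Int × Int × Int) x =>
        let pre := PySem.Int.bxor st.2.2 x
        let res := st.2.1 + st.1.getD pre 0
        let dp := st.1.modify pre 0 (· + 1)
        (dp, res, pre)) (d, res, pre)).2.1
      = pvPsum ((pvPrefs pre l).foldl (fun d x => d.modify x 0 (· + 1)) d) := by
  induction l with
  | nil => intro d res pre _ h; simpa [pvPrefs] using h
  | cons x t ih =>
    intro d res pre hnd hres
    simp only [List.foldl_cons, pvPrefs]
    exact ih (d.modify (PySem.Int.bxor pre x) 0 (· + 1))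
      (res + d.getD (PySem.Int.bxor pre x) 0) (PySem.Int.bxor pre x)
      (by rw [PySem.Dict.keys_modify]; exact PySem.Dict.nodup_keys_insert _ _ _ hnd)
      (by rw [psum_modify d _ hnd, hres])

-- B's loop: the accumulated list is acc ++ the produced prefixes
theorem pvLoopB (l : List Int) : ∀ (acc : List Int) (pre : Int),
    (l.foldl (fun (st : List Int × Int) x =>
        let pre := PySem.Int.bxor st.2 x
        (st.1 ++ [pre], pre)) (acc, pre)).1 = acc ++ pvPrefs pre l := by
  induction l with
  | nil => intro acc pre; simp [pvPrefs]
  | cons x t ih =>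
    intro acc pre
    simp only [List.foldl_cons, pvPrefs]
    rw [ih]
    simp

-- ===== VERDICT (by name: the statement is the Claim_ definition above) =====
theorem beautifulSubarrays_spec : Claim_equal_beautifulSubarrays := by
  intro nums _
  unfold Spec_beautifulSubarrays beautifulSubarrays beautifulSubarrays_alt
  dsimp only
  rw [pvLoopB nums [0] 0, pvLoopA nums (PySem.Dict.ofList [(0, 1)]) 0 0 (by decide) (by decide)]
  rw [PySem.Dict.counter_eq_foldl]
  show pvPsum _ = pvPsum _
  simp only [List.singleton_append, List.foldl_cons]
  congr 1
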